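-- pv_equiv track=rewrite | github.com/kamalshadi/NEO4j-MANIA | group_mania.py | num2edge
-- ===== SOURCE A (Python) =====
-- def num2edge(a,l):
-- 	c=0
-- 	for i in range(l):
-- 		for j in range(l):
-- 			if i==j:
-- 				continue
-- 			if a==c:
-- 				return (i,j)
-- 			c=c+1
-- ===== SOURCE B (Python) =====
-- def num2edge(a, l):
--     # Closed-form O(1): the a-th ordered pair (i, j) with i != j, 0 <= i, j < l.
--     if l < 2 or a < 0 or a >= l * (l - 1):
--         return None
--     i, r = divmod(a, l - 1)
--     j = r if r < i else r + 1
--     return (i, j)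
-- ===== Notes on version B (the rewrite author's own statement) =====
-- stated objective: faster
-- what changed: Replaced the O(l^2) nested scan counting pairs one by one with O(1) closed-form arithmetic: i = a // (l-1) and j = a % (l-1) adjusted upward when it reaches i.
import Mathlib
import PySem

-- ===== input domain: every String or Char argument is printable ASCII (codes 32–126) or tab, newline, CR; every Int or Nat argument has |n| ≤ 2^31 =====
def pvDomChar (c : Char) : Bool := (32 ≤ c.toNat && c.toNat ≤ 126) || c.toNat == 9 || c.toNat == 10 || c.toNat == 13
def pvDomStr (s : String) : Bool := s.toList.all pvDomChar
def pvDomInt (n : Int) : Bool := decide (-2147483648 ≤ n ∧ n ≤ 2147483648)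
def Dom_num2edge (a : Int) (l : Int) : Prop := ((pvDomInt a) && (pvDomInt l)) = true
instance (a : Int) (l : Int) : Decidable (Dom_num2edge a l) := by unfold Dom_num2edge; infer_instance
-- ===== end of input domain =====

-- B replaces A's O(l^2) pair-counting double loop by O(1) closed-form arithmetic (objective: faster).

-- ===== PORT A =====
-- inner 'for j in range(l)' loop; state: counter c; returns (early-return value, updated c)
def num2edgeInner (a i : Int) : List Int → Int → (Option (List Int) × Int)
  | [], c => (none, c)
  | j :: js, c =>
    if i = j then num2edgeInner a i js c
    else if a = c then (some [i, j], c)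
    else num2edgeInner a i js (c + 1)

-- outer 'for i in range(l)' loop
def num2edgeOuter (a l : Int) : List Int → Int → Option (List Int)
  | [], _ => none
  | i :: is, c =>
    match num2edgeInner a i (PySem.List.pyRange 0 l 1) c with
    | (some r, _) => some r
    | (none, c') => num2edgeOuter a l is c'

def num2edge (a : Int) (l : Int) : Option (List Int) :=
  num2edgeOuter a l (PySem.List.pyRange 0 l 1) 0

-- ===== PORT B =====
def num2edge_alt (a : Int) (l : Int) : Option (List Int) :=
  if l < 2 ∨ a < 0 ∨ a ≥ l * (l - 1) then none
  else
    let i := PySem.Int.floordiv a (l - 1)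
    let r := PySem.Int.mod a (l - 1)
    some [i, if r < i then r else r + 1]

-- ===== PRECONDITION & SPEC =====
def Spec_num2edge (a : Int) (l : Int) (out : Option (List Int)) : Prop := out = num2edge_alt a l
instance (a : Int) (l : Int) (out : Option (List Int)) : Decidable (Spec_num2edge a l out) := by unfold Spec_num2edge; infer_instance

-- ===== CLAIM (what is proved, stated in full; the proofs are below) =====
def Claim_equal_num2edge : Prop := ∀ (a : Int) (l : Int), Dom_num2edge a l → Spec_num2edge a l (num2edge a l)

-- ===== LEMMAS AND PROOFS =====

-- the inner loop scanning a run of j-values [s, t) that never hits i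
theorem num2edgeInner_run (a i : Int) : ∀ (n : Nat) (s t c : Int), (t - s).toNat = n →
    s ≤ t → (i < s ∨ t ≤ i) →
    num2edgeInner a i (PySem.List.pyRange s t 1) c =
      if c ≤ a ∧ a < c + (t - s) then (some [i, s + (a - c)], a) else (none, c + (t - s)) := by
  intro n
  induction n with
  | zero =>
    intro s t c hn hst _
    have hts : t = s := by omega
    subst hts
    rw [PySem.List.pyRange_one_eq_nil le_rfl]
    simp [num2edgeInner]
  | succ n ih =>
    intro s t c hn hst hi
    have hlt : s < t := by omega
    rw [PySem.List.pyRange_one_cons hlt]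
    have hne : i ≠ s := by omega
    by_cases hac : a = c
    · subst hac
      rw [show num2edgeInner a i (s :: PySem.List.pyRange (s+1) t 1) a
            = (some [i, s], a) by simp [num2edgeInner, hne]]
      rw [if_pos (by omega : a ≤ a ∧ a < a + (t - s))]
      norm_num
    · rw [show num2edgeInner a i (s :: PySem.List.pyRange (s+1) t 1) c
            = num2edgeInner a i (PySem.List.pyRange (s+1) t 1) (c + 1) by
          simp [num2edgeInner, hne, hac]]
      rw [ih (s+1) t (c+1) (by omega) (by omega) (by omega)]
      by_cases h1 : c + 1 ≤ a ∧ a < c + 1 + (t - (s+1))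
      · rw [if_pos h1, if_pos (by omega)]
        rw [show s + 1 + (a - (c + 1)) = s + (a - c) by ring]
      · rw [if_neg h1, if_neg (by omega)]
        rw [show c + 1 + (t - (s + 1)) = c + (t - s) by ring]

-- the inner loop short-circuits across an append
theorem num2edgeInner_append (a i : Int) : ∀ (xs ys : List Int) (c : Int),
    num2edgeInner a i (xs ++ ys) c =
      match num2edgeInner a i xs c with
      | (some r, c') => (some r, c')
      | (none, c') => num2edgeInner a i ys c' := by
  intro xs
  induction xs with
  | nil => intro ys c; simp [num2edgeInner]
  | cons x xs ih =>
    intro ys c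
    simp only [List.cons_append]
    by_cases hx : i = x
    · simp only [num2edgeInner, if_pos hx]
      exact ih ys c
    · by_cases hac : a = c
      · simp [num2edgeInner, hx, hac]
      · simp only [num2edgeInner, if_neg hx, if_neg hac]
        exact ih ys (c + 1)

-- the full inner loop over range(l) for a valid row index i
theorem num2edgeInner_full (a i l c : Int) (h0 : 0 ≤ i) (hl : i < l) :
    num2edgeInner a i (PySem.List.pyRange 0 l 1) c =
      if c ≤ a ∧ a < c + (l - 1) then
        (some [i, if a - c < i then a - c else a - c + 1], a)
      else (none, c + (l - 1)) := by
  rw [PySem.List.pyRange_one_append 0 i l h0 (le_of_lt hl),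
      PySem.List.pyRange_one_cons hl, num2edgeInner_append]
  rw [num2edgeInner_run a i (i - 0).toNat 0 i c rfl h0 (by omega)]
  by_cases h1 : c ≤ a ∧ a < c + (i - 0)
  · rw [if_pos h1]
    dsimp only
    rw [if_pos (by omega : c ≤ a ∧ a < c + (l - 1)), if_pos (by omega : a - c < i)]
    norm_num
  · rw [if_neg h1]
    dsimp only
    rw [show num2edgeInner a i (i :: PySem.List.pyRange (i+1) l 1) (c + (i - 0))
          = num2edgeInner a i (PySem.List.pyRange (i+1) l 1) (c + (i - 0)) by
        simp [num2edgeInner]]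
    rw [num2edgeInner_run a i (l - (i+1)).toNat (i+1) l (c + (i - 0)) rfl (by omega) (by omega)]
    by_cases h2 : c + (i - 0) ≤ a ∧ a < c + (i - 0) + (l - (i + 1))
    · rw [if_pos h2, if_pos (by omega : c ≤ a ∧ a < c + (l - 1)),
          if_neg (by omega : ¬ (a - c < i)),
          show i + 1 + (a - (c + (i - 0))) = a - c + 1 by ring]
    · rw [if_neg h2, if_neg (by omega : ¬ (c ≤ a ∧ a < c + (l - 1))),
          show c + (i - 0) + (l - (i + 1)) = c + (l - 1) by ring]

-- the outer loop over the tail range [t, l), with counter t*(l-1)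
theorem num2edgeOuter_spec (a l : Int) : ∀ (n : Nat) (t c : Int), (l - t).toNat = n →
    0 ≤ t → t ≤ l → c = t * (l - 1) →
    num2edgeOuter a l (PySem.List.pyRange t l 1) c =
      if c ≤ a ∧ a < l * (l - 1) then
        some [PySem.Int.floordiv a (l - 1),
              if PySem.Int.mod a (l - 1) < PySem.Int.floordiv a (l - 1)
              then PySem.Int.mod a (l - 1) else PySem.Int.mod a (l - 1) + 1]
      else none := by
  intro n
  induction n with
  | zero =>
    intro t c hn _ htl hc
    have : t = l := by omega
    subst this
    rw [PySem.List.pyRange_one_eq_nil le_rfl]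
    simp only [num2edgeOuter]
    rw [if_neg (by omega)]
  | succ n ih =>
    intro t c hn ht htl hc
    have hlt : t < l := by omega
    rw [PySem.List.pyRange_one_cons hlt]
    show (match num2edgeInner a t (PySem.List.pyRange 0 l 1) c with
          | (some r, _) => some r
          | (none, c') => num2edgeOuter a l (PySem.List.pyRange (t+1) l 1) c') = _
    rw [num2edgeInner_full a t l c ht hlt]
    have hb : (0:Int) ≤ l - 1 := by omega
    have hstep : c + (l - 1) = (t + 1) * (l - 1) := by rw [hc]; ring
    by_cases h1 : c ≤ a ∧ a < c + (l - 1)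
    · rw [if_pos h1]
      dsimp only
      have hbpos : (0:Int) < l - 1 := by omega
      have hdiv : PySem.Int.floordiv a (l - 1) = t := by
        rw [PySem.Int.floordiv_eq_iff_of_pos hbpos]
        constructor
        · calc t * (l - 1) = c := hc.symm
            _ ≤ a := h1.1
        · calc a < c + (l - 1) := h1.2
            _ = (t + 1) * (l - 1) := hstep
      have hmod : PySem.Int.mod a (l - 1) = a - c := by
        have := PySem.Int.floordiv_mul_add_mod a (l - 1)
        rw [hdiv] at this
        omega
      have hgoal : a < l * (l - 1) := by
        have : (t + 1) * (l - 1) ≤ l * (l - 1) :=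
          mul_le_mul_of_nonneg_right (by omega) hb
        omega
      have hcond : c ≤ a ∧ a < l * (l - 1) := ⟨h1.1, hgoal⟩
      rw [if_pos hcond, hdiv, hmod]
    · rw [if_neg h1]
      dsimp only
      rw [ih (t+1) (c + (l-1)) (by omega) (by omega) (by omega) hstep]
      by_cases h2 : c + (l - 1) ≤ a ∧ a < l * (l - 1)
      · have hcond : c ≤ a ∧ a < l * (l - 1) := ⟨by omega, h2.2⟩
        rw [if_pos h2, if_pos hcond]
      · rw [if_neg h2]
        by_cases h3 : c ≤ a ∧ a < l * (l - 1)
        · exfalso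
          have hlow : a < (t + 1) * (l - 1) := by omega
          have hle : (t + 1) * (l - 1) ≤ l * (l - 1) :=
            mul_le_mul_of_nonneg_right (by omega) hb
          omega
        · rw [if_neg h3]

-- ===== VERDICT (by name: the statement is the Claim_ definition above) =====
theorem num2edge_spec : Claim_equal_num2edge := by
  intro a l _
  unfold Spec_num2edge num2edge num2edge_alt
  by_cases hl : l < 0
  · rw [PySem.List.pyRange_one_eq_nil (by omega), if_pos (Or.inl (by omega : l < 2))]
    simp [num2edgeOuter]
  · rw [num2edgeOuter_spec a l (l - 0).toNat 0 0 rfl le_rfl (by omega) (by ring)]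
    by_cases h2 : l < 2
    · have h0l : 0 ≤ l := by omega
      have hz : l * (l - 1) = 0 := by interval_cases l <;> norm_num
      rw [if_neg (show ¬ ((0:Int) ≤ a ∧ a < l * (l - 1)) from by omega),
          if_pos (Or.inl h2)]
    · by_cases ha : 0 ≤ a ∧ a < l * (l - 1)
      · rw [if_pos ha,
            if_neg (show ¬ (l < 2 ∨ a < 0 ∨ a ≥ l * (l - 1)) from by omega)]
      · rw [if_neg ha,
            if_pos (show l < 2 ∨ a < 0 ∨ a ≥ l * (l - 1) from by omega)]
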